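-- pv_equiv track=rewrite | github.com/iwbc-mzk/atcoder | typical90/058/main.py | convert
-- ===== SOURCE A (Python) =====
-- def convert(v: int) -> int:
--     t = 0
--     vv = v
--     for i in reversed(range(5)):
--         t += vv // 10**i
--         vv -= (vv // 10**i) * 10**i
--     v += t
--     v %= 10**5
--     return v
-- ===== SOURCE B (Python) =====
-- def convert(v: int) -> int:
--     # Casting-out-nines: the digit-sum-augmented value v + t collapses to
--     # 2*v - 9*(v//10 + v//100 + v//1000 + v//10000); no digit extraction needed.
--     return (2 * v - 9 * (v // 10 + v // 100 + v // 1000 + v // 10000)) % 100000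
-- ===== Notes on version B (the rewrite author's own statement) =====
-- stated objective: simpler
-- what changed: Replaced A's digit-extraction loop (quotient/remainder per power of ten, accumulating a digit sum) by the casting-out-nines identity v + digitsum(v) = 2*v - 9*(v//10 + v//100 + v//1000 + v//10000), a single arithmetic expression with no remainders or digit extraction.
import Mathlib
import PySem

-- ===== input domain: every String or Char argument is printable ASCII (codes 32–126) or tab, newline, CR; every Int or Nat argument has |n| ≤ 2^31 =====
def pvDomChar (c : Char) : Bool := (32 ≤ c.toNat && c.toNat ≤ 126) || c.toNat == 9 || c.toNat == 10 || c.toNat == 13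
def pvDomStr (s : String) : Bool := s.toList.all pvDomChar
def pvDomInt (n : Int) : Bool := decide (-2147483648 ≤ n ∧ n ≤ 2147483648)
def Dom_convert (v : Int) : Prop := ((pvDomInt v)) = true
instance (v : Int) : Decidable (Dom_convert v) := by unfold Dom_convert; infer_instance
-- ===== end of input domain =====

-- B replaces A's digit-extraction loop by the casting-out-nines identity
-- v + digitsum(v) = 2*v - 9*(v//10 + v//100 + v//1000 + v//10000) (simpler).

-- ===== PORT A =====
def convert (v : Int) : Int :=
  -- t = 0; vv = v; for i in reversed(range(5)): t += vv // 10**i; vv -= (vv // 10**i) * 10**i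
  let s := (PySem.List.pyRange 0 5 1).reverse.foldl
    (fun (s : Int × Int) (i : Int) =>
      let q := PySem.Int.floordiv s.2 (10 ^ i.toNat)
      (s.1 + q, s.2 - q * 10 ^ i.toNat)) (0, v)
  PySem.Int.mod (v + s.1) (10 ^ 5)

-- ===== PORT B =====
def convert_alt (v : Int) : Int :=
  PySem.Int.mod
    (2 * v - 9 * (PySem.Int.floordiv v 10 + PySem.Int.floordiv v 100
                  + PySem.Int.floordiv v 1000 + PySem.Int.floordiv v 10000))
    100000

-- ===== PRECONDITION & SPEC =====
def Spec_convert (v : Int) (out : Int) : Prop := out = convert_alt v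
instance (v : Int) (out : Int) : Decidable (Spec_convert v out) := by unfold Spec_convert; infer_instance

-- ===== CLAIM (what is proved, stated in full; the proofs are below) =====
def Claim_equal_convert : Prop := ∀ (v : Int), Dom_convert v → Spec_convert v (convert v)

-- ===== LEMMAS AND PROOFS =====
theorem convert_eq_alt (v : Int) : convert v = convert_alt v := by
  unfold convert convert_alt
  have h : (PySem.List.pyRange 0 5 1).reverse = [4, 3, 2, 1, 0] := by decide
  rw [h]
  simp only [List.foldl]
  norm_num [PySem.Int.floordiv_eq_ediv_of_pos, PySem.Int.mod_eq_emod_of_pos,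
    show Int.toNat 4 = 4 from rfl, show Int.toNat 3 = 3 from rfl,
    show Int.toNat 2 = 2 from rfl, show Int.toNat 1 = 1 from rfl,
    show Int.toNat 0 = 0 from rfl]
  congr 1
  omega

-- ===== VERDICT (by name: the statement is the Claim_ definition above) =====
theorem convert_spec : Claim_equal_convert := by
  intro v _
  unfold Spec_convert
  exact convert_eq_alt v
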